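-- pv_equiv track=rewrite | github.com/ptgressman/COVIDanalysis | mldistr4.py | collate_durations
-- ===== SOURCE A (Python) =====
-- def collate_durations(durationlist):
--     maxdur = -1
--     for item in durationlist:
--         if len(item['complete']) > 0:
--             maxdur = max(maxdur,max(item['complete']))
--         if len(item['incomplete']) > 0:
--             maxdur = max(maxdur,max(item['incomplete']))
--     exacts = [0] * (maxdur + 1)
--     ongoin = [0] * (maxdur + 1)
--     for item in durationlist:
--         for subitem in item['complete']:
--             exacts[subitem] += 1
--         for subitem in item['incomplete']:
--             ongoin[subitem] += 1
--     result = {'closed' : exacts, 'open' : ongoin}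
--     return result
-- ===== SOURCE B (Python) =====
-- def collate_durations(durationlist):
--     # One counting pass: two value-keyed dicts plus a running maximum; then
--     # scatter each distinct value's count into the preallocated histograms.
--     closed_counts = {}
--     open_counts = {}
--     maxdur = -1
--     for item in durationlist:
--         for v in item['complete']:
--             closed_counts[v] = closed_counts.get(v, 0) + 1
--             if v > maxdur:
--                 maxdur = v
--         for v in item['incomplete']:
--             open_counts[v] = open_counts.get(v, 0) + 1
--             if v > maxdur:
--                 maxdur = v
--     exacts = [0] * (maxdur + 1)
--     ongoin = [0] * (maxdur + 1)
--     for v, c in closed_counts.items():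
--         exacts[v] += c
--     for v, c in open_counts.items():
--         ongoin[v] += c
--     return {'closed': exacts, 'open': ongoin}
-- ===== Notes on version B (the rewrite author's own statement) =====
-- stated objective: alternative
-- what changed: Replaces A's two phases (a guarded max pass, then per-occurrence index-addressed increments into preallocated [0]*(maxdur+1) arrays) by a single counting pass maintaining two value-keyed dicts plus a running maximum, followed by one scatter of each distinct value's count into the preallocated histograms; Pre_ excludes only inputs where A raises (an item missing a 'complete'/'incomplete' key, or a value below -(maxdur+1)).
import Mathlib
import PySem

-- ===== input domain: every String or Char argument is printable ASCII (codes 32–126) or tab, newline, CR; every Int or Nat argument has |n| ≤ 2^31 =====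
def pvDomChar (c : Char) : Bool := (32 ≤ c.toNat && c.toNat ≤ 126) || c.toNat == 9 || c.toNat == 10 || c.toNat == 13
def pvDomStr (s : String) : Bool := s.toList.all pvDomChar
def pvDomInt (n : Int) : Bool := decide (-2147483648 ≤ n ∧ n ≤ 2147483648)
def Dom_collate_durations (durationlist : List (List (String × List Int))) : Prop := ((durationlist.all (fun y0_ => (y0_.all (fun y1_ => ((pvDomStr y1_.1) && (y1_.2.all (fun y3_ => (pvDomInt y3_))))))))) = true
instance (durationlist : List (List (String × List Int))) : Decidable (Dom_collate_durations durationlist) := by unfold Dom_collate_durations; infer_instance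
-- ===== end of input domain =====

-- B replaces A's two phases (guarded max pass, then per-occurrence increments into
-- [0]*(maxdur+1) arrays) by one counting pass over two value-keyed dicts with a running
-- maximum, then one scatter of each distinct value's count into the preallocated arrays.

-- ===== PORT A =====
-- item[k] on the Python dict built from the pairs (duplicate keys: last value wins, as dict() does)
def pvLookup (item : List (String × List Int)) (k : String) : List Int :=
  (PySem.Dict.ofList item).getD k []   -- a missing key is a KeyError — excluded by Pre_

-- exacts[v] += 1 : Python resolves a negative v from the end; none = IndexError, excluded by Pre_
def pvIncr (l : List Int) (v : Int) : List Int :=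
  match PySem.List.pyIdx? l.length v with
  | some i => l.set i (l.getD i 0 + 1)
  | none => l

-- the body of A's first loop: maxdur = max(maxdur, max(...)) under the two emptiness guards
def pvAStep (md : Int) (item : List (String × List Int)) : Int :=
  let md := if (pvLookup item "complete").length > 0 then
      max md ((PySem.List.max? (pvLookup item "complete") id).getD 0) else md
  if (pvLookup item "incomplete").length > 0 then
      max md ((PySem.List.max? (pvLookup item "incomplete") id).getD 0) else md

-- the body of A's second loop: the two inner increment loops
def pvPairStep (p : List Int × List Int) (item : List (String × List Int)) : List Int × List Int :=
  ((pvLookup item "complete").foldl pvIncr p.1,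
   (pvLookup item "incomplete").foldl pvIncr p.2)

def collate_durations (durationlist : List (List (String × List Int))) : List (String × List Int) :=
  let maxdur := durationlist.foldl pvAStep (-1)
  let exacts := List.replicate (maxdur + 1).toNat (0 : Int)
  let ongoin := List.replicate (maxdur + 1).toNat (0 : Int)
  let p := durationlist.foldl pvPairStep (exacts, ongoin)
  [("closed", p.1), ("open", p.2)]

-- ===== PORT B =====
-- counts[v] = counts.get(v, 0) + 1; if v > maxdur: maxdur = v
def pvTally (s : PySem.Dict Int Int × Int) (v : Int) : PySem.Dict Int Int × Int :=
  (s.1.insert v (s.1.getD v 0 + 1), if v > s.2 then v else s.2)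

-- the body of B's single loop: tally the two value lists of one item
def pvBStep (st : PySem.Dict Int Int × PySem.Dict Int Int × Int)
    (item : List (String × List Int)) : PySem.Dict Int Int × PySem.Dict Int Int × Int :=
  let c := (pvLookup item "complete").foldl pvTally (st.1, st.2.2)
  let o := (pvLookup item "incomplete").foldl pvTally (st.2.1, c.2)
  (c.1, o.1, o.2)

-- exacts[v] += c : Python's negative index resolves from the end; none = IndexError (outside Pre_)
def pvIncrBy (l : List Int) (p : Int × Int) : List Int :=
  match PySem.List.pyIdx? l.length p.1 with
  | some i => l.set i (l.getD i 0 + p.2)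
  | none => l

def collate_durations_alt (durationlist : List (List (String × List Int))) : List (String × List Int) :=
  let st := durationlist.foldl pvBStep (PySem.Dict.empty, PySem.Dict.empty, -1)
  let exacts := List.replicate (st.2.2 + 1).toNat (0 : Int)
  let ongoin := List.replicate (st.2.2 + 1).toNat (0 : Int)
  let exacts := st.1.items.foldl pvIncrBy exacts
  let ongoin := st.2.1.items.foldl pvIncrBy ongoin
  [("closed", exacts), ("open", ongoin)]

-- ===== PRECONDITION & SPEC =====
-- the per-item value lists, all values in A's traversal order, and their maximum (as A seeds it)
def pvC (item : List (String × List Int)) : List Int := pvLookup item "complete"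
def pvI (item : List (String × List Int)) : List Int := pvLookup item "incomplete"
def pvAll (dl : List (List (String × List Int))) : List Int := dl.flatMap (fun it => pvC it ++ pvI it)
def pvMaxAll (dl : List (List (String × List Int))) : Int := (pvAll dl).foldl max (-1)

-- Pre_ excludes exactly the inputs where A raises: an item without a 'complete'/'incomplete' key
-- (KeyError), or a value below -(maxdur+1), which indexes outside [0]*(maxdur+1) (IndexError).
def Pre_collate_durations (durationlist : List (List (String × List Int))) : Prop :=
  (∀ item ∈ durationlist,
    (PySem.Dict.ofList item).contains "complete" = true ∧
    (PySem.Dict.ofList item).contains "incomplete" = true) ∧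
  (∀ v ∈ pvAll durationlist, -(pvMaxAll durationlist + 1) ≤ v)
instance (durationlist : List (List (String × List Int))) : Decidable (Pre_collate_durations durationlist) := by unfold Pre_collate_durations; infer_instance

def pvWitness_collate_durations : (List (List (String × List Int))) :=
  [[("complete", [1, 0]), ("incomplete", [2])]]

def Spec_collate_durations (durationlist : List (List (String × List Int))) (out : List (String × List Int)) : Prop := out = collate_durations_alt durationlist
instance (durationlist : List (List (String × List Int))) (out : List (String × List Int)) : Decidable (Spec_collate_durations durationlist out) := by unfold Spec_collate_durations; infer_instance

-- ===== CLAIM (what is proved, stated in full; the proofs are below) =====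
def Claim_equal_collate_durations : Prop := ∀ (durationlist : List (List (String × List Int))), Dom_collate_durations durationlist → Pre_collate_durations durationlist → Spec_collate_durations durationlist (collate_durations durationlist)

-- ===== LEMMAS AND PROOFS =====

def pvInsIncr (d : PySem.Dict Int Int) (v : Int) : PySem.Dict Int Int := d.insert v (d.getD v 0 + 1)

-- B's tally fold splits into a counter fold and a max fold
lemma tally_foldl (c : List Int) (d : PySem.Dict Int Int) (md : Int) :
    c.foldl pvTally (d, md) = (c.foldl pvInsIncr d, c.foldl max md) := by
  induction c generalizing d md with
  | nil => rfl
  | cons v vs ih =>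
      simp only [List.foldl_cons]
      rw [show pvTally (d, md) v = (pvInsIncr d v, max md v) from ?_, ih]
      simp only [pvTally, pvInsIncr]
      congr 1
      by_cases h : v > md
      · rw [if_pos h, max_eq_right h.le]
      · rw [if_neg h, max_eq_left (by omega)]

-- Python's max() (PySem.List.max?) on a nonempty list is a foldl max over the tail
lemma max?_cons_eq (xs : List Int) : ∀ x : Int, PySem.List.max? (x :: xs) id = some (xs.foldl max x) := by
  induction xs with
  | nil => intro x; rfl
  | cons y ys ih =>
      intro x
      have h1 : PySem.List.max? (x :: y :: ys) id = PySem.List.max? (max x y :: ys) id := by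
        unfold PySem.List.max?
        simp only [List.foldl_cons, id_eq]
        congr 1
        show (if x < y then some y else some x) = some (max x y)
        by_cases h : x < y
        · rw [if_pos h, max_eq_right h.le]
        · rw [if_neg h, max_eq_left (by omega)]
      rw [h1, ih (max x y), List.foldl_cons]

-- max md (foldl max x xs) absorbs into the seed
lemma max_foldl_seed (xs : List Int) (x md : Int) :
    max md (xs.foldl max x) = xs.foldl max (max md x) := by
  induction xs generalizing x md with
  | nil => rfl
  | cons y ys ih =>
      simp only [List.foldl_cons]
      rw [ih, max_assoc]

-- A's per-list 'if nonempty then max(md, max(c))' is B's running max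
lemma max_branch_eq (c : List Int) (md : Int) :
    (if c.length > 0 then max md ((PySem.List.max? c id).getD 0) else md) = c.foldl max md := by
  cases c with
  | nil => simp
  | cons x xs =>
      simp only [List.length_cons, List.foldl_cons]
      rw [if_pos (Nat.succ_pos _), max?_cons_eq, Option.getD_some, max_foldl_seed]

-- the filtered-sum of the values of a pair list at a key
def pvKeySum (ps : List (Int × Int)) (k : Int) : Int :=
  ((ps.filter (fun p => p.1 == k)).map (·.2)).sum

lemma keySum_cons (p : Int × Int) (ps : List (Int × Int)) (k : Int) :
    pvKeySum (p :: ps) k = (if p.1 = k then p.2 else 0) + pvKeySum ps k := by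
  unfold pvKeySum
  rw [List.filter_cons]
  by_cases h : p.1 = k
  · simp [h]
  · simp [h]

-- the scatter fold adds, per slot i, the summed counts at key i and at key i - len (wraparound)
lemma incrBy_foldl (ps : List (Int × Int)) (l : List Int)
    (h : ∀ p ∈ ps, -(l.length : Int) ≤ p.1 ∧ p.1 < (l.length : Int)) :
    (ps.foldl pvIncrBy l).length = l.length ∧
      ∀ i : Nat, i < l.length →
        (ps.foldl pvIncrBy l).getD i 0
          = l.getD i 0 + pvKeySum ps (i : Int) + pvKeySum ps ((i : Int) - (l.length : Int)) := by
  induction ps generalizing l with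
  | nil => simp [pvKeySum]
  | cons p ps ih =>
      obtain ⟨hvlo, hvhi⟩ := h p List.mem_cons_self
      have hstep : ∃ j : Nat, j < l.length ∧ ((j : Int) = p.1 ∨ (j : Int) = (l.length : Int) + p.1) ∧
          pvIncrBy l p = l.set j (l.getD j 0 + p.2) := by
        by_cases hv0 : 0 ≤ p.1
        · refine ⟨p.1.toNat, by omega, Or.inl (by omega), ?_⟩
          unfold pvIncrBy PySem.List.pyIdx?
          rw [if_pos hv0, if_pos hvhi]
        · refine ⟨l.length - (-p.1).toNat, by omega, Or.inr (by omega), ?_⟩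
          unfold pvIncrBy PySem.List.pyIdx?
          rw [if_neg hv0, if_pos (by omega)]
      obtain ⟨j, hjl, hjv, hstep⟩ := hstep
      have hlen : (pvIncrBy l p).length = l.length := by rw [hstep, List.length_set]
      obtain ⟨ihl, ihg⟩ := ih (pvIncrBy l p) (by
        intro q hq
        obtain ⟨q0, ql⟩ := h q (List.mem_cons_of_mem _ hq)
        rw [hlen]
        exact ⟨q0, ql⟩)
      rw [hlen] at ihl ihg
      refine ⟨by rw [List.foldl_cons, ihl], ?_⟩
      intro i hi
      rw [List.foldl_cons, ihg i hi]
      have hset : (pvIncrBy l p).getD i 0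
          = l.getD i 0 + (if p.1 = (i : Int) then p.2 else 0)
              + (if p.1 = (i : Int) - (l.length : Int) then p.2 else 0) := by
        rw [hstep,
            PySem.List.getD_eq_getElem_of_lt _ _ _ (by rw [List.length_set]; exact hi),
            List.getElem_set]
        rcases hjv with hj | hj
        · by_cases hji : j = i
          · subst hji
            rw [if_pos rfl]
            split_ifs <;> omega
          · rw [if_neg hji, PySem.List.getD_eq_getElem_of_lt l i 0 hi]
            have : (j : Int) ≠ (i : Int) := by omega
            split_ifs <;> omega
        · by_cases hji : j = i
          · subst hji
            rw [if_pos rfl]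
            split_ifs <;> omega
          · rw [if_neg hji, PySem.List.getD_eq_getElem_of_lt l i 0 hi]
            have : (j : Int) ≠ (i : Int) := by omega
            split_ifs <;> omega
      rw [hset, keySum_cons, keySum_cons]
      split_ifs <;> omega

-- A's per-occurrence increment is the scatter with every count 1
lemma incr_as_incrBy (vs : List Int) (l : List Int) :
    vs.foldl pvIncr l = (vs.map (fun v => (v, (1 : Int)))).foldl pvIncrBy l := by
  induction vs generalizing l with
  | nil => rfl
  | cons v vs ih =>
      simp only [List.map_cons, List.foldl_cons]
      rw [show pvIncr l v = pvIncrBy l (v, 1) from rfl, ih]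

-- the key sum of the unit pairs is the count
lemma keySum_units (vs : List Int) (k : Int) :
    pvKeySum (vs.map (fun v => (v, (1 : Int)))) k = (vs.count k : Int) := by
  induction vs with
  | nil => simp [pvKeySum]
  | cons v vs ih =>
      rw [List.map_cons, keySum_cons, ih, List.count_cons]
      by_cases h : v = k
      · simp [h]; omega
      · simp [h]

-- the key sum of the counter's items is the count
lemma keySum_counter (vs : List Int) (k : Int) :
    pvKeySum ((PySem.Dict.counter vs).items) k = (vs.count k : Int) := by
  rw [PySem.Dict.items_counter]
  by_cases hmem : k ∈ vs
  · have hk : k ∈ PySem.Set.ofList vs := (PySem.Set.mem_ofList _ _).mpr hmem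
    have hnd : (PySem.Set.ofList vs).Nodup := PySem.Set.nodup_ofList vs
    unfold pvKeySum
    rw [List.filter_map]
    have : (PySem.Set.ofList vs).filter ((fun p : Int × Int => p.1 == k) ∘ (fun k => (k, (vs.count k : Int)))) = [k] := by
      have hgen : ∀ (S : List Int), S.Nodup → k ∈ S →
          S.filter ((fun p : Int × Int => p.1 == k) ∘ (fun k => (k, (vs.count k : Int)))) = [k] := by
        intro S
        induction S with
        | nil => intro _ h; cases h
        | cons x S ihS =>
            intro hnd hm
            rw [List.filter_cons]
            by_cases hx : x = k
            · subst hx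
              simp only [Function.comp_apply, BEq.rfl, if_pos]
              have : S.filter ((fun p : Int × Int => p.1 == x) ∘ (fun k => (k, (vs.count k : Int)))) = [] := by
                rw [List.filter_eq_nil_iff]
                intro a ha
                simp only [Function.comp_apply, beq_iff_eq]
                intro hax
                exact (List.nodup_cons.mp hnd).1 (hax ▸ ha)
              simp [this]
            · have hm' : k ∈ S := by
                rcases List.mem_cons.mp hm with h | h
                · exact absurd h.symm hx
                · exact h
              simp only [Function.comp_apply, beq_iff_eq, hx, if_false]
              exact ihS (List.nodup_cons.mp hnd).2 hm'
      exact hgen _ hnd hk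
    rw [this]
    simp
  · unfold pvKeySum
    have : ((PySem.Set.ofList vs).map (fun k => (k, (vs.count k : Int)))).filter (fun p => p.1 == k) = [] := by
      rw [List.filter_eq_nil_iff]
      intro p hp
      rw [List.mem_map] at hp
      obtain ⟨a, ha, rfl⟩ := hp
      simp only [beq_iff_eq]
      intro hak
      exact hmem (hak ▸ (PySem.Set.mem_ofList _ _).mp ha)
    rw [this]
    simp [List.count_eq_zero.mpr hmem]

-- A's pair fold flattens to two independent folds
lemma pair_foldl (dl : List (List (String × List Int))) (e o : List Int) :
    dl.foldl pvPairStep (e, o)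
      = ((dl.flatMap pvC).foldl pvIncr e, (dl.flatMap pvI).foldl pvIncr o) := by
  induction dl generalizing e o with
  | nil => rfl
  | cons it dl ih => simp [List.foldl_cons, pvPairStep, ih, List.foldl_append, pvC, pvI]

-- A's max fold flattens to a fold over all values
lemma amax_foldl (dl : List (List (String × List Int))) (md : Int) :
    dl.foldl pvAStep md = (pvAll dl).foldl max md := by
  induction dl generalizing md with
  | nil => rfl
  | cons it dl ih =>
      simp only [List.foldl_cons, pvAll, List.flatMap_cons, List.foldl_append]
      rw [show pvAStep md it
            = (pvI it).foldl max ((pvC it).foldl max md) from ?_, ih]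
      · rfl
      · unfold pvAStep
        rw [max_branch_eq, max_branch_eq]
        rfl

-- B's triple fold flattens to two counter folds and the same max fold
lemma bfold_eq (dl : List (List (String × List Int))) (d1 d2 : PySem.Dict Int Int) (md : Int) :
    dl.foldl pvBStep (d1, d2, md)
      = ((dl.flatMap pvC).foldl pvInsIncr d1, (dl.flatMap pvI).foldl pvInsIncr d2,
         (pvAll dl).foldl max md) := by
  induction dl generalizing d1 d2 md with
  | nil => rfl
  | cons it dl ih =>
      rw [List.foldl_cons,
        show pvBStep (d1, d2, md) it
          = ((pvC it).foldl pvInsIncr d1, (pvI it).foldl pvInsIncr d2,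
             (pvI it).foldl max ((pvC it).foldl max md)) from by
          simp [pvBStep, tally_foldl, pvC, pvI],
        ih]
      simp [pvAll, List.flatMap_cons, List.foldl_append]

-- characterizations of the two ports
lemma A_char (dl : List (List (String × List Int))) :
    collate_durations dl =
      [("closed", (dl.flatMap pvC).foldl pvIncr
          (List.replicate ((pvAll dl).foldl max (-1) + 1).toNat (0 : Int))),
       ("open", (dl.flatMap pvI).foldl pvIncr
          (List.replicate ((pvAll dl).foldl max (-1) + 1).toNat (0 : Int)))] := by
  simp only [collate_durations]
  rw [amax_foldl, pair_foldl]

lemma B_char (dl : List (List (String × List Int))) :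
    collate_durations_alt dl =
      [("closed", (PySem.Dict.counter (dl.flatMap pvC)).items.foldl pvIncrBy
          (List.replicate ((pvAll dl).foldl max (-1) + 1).toNat (0 : Int))),
       ("open", (PySem.Dict.counter (dl.flatMap pvI)).items.foldl pvIncrBy
          (List.replicate ((pvAll dl).foldl max (-1) + 1).toNat (0 : Int)))] := by
  simp only [collate_durations_alt]
  rw [bfold_eq,
      show pvInsIncr = fun (d : PySem.Dict Int Int) (x : Int) => d.insert x (d.getD x 0 + 1) from rfl,
      PySem.Dict.foldl_insert_getD_add_one_eq_counter, PySem.Dict.foldl_insert_getD_add_one_eq_counter]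

-- two scatter folds with equal key sums and in-range keys produce the same array
lemma scatter_eq (ps qs : List (Int × Int)) (N : Nat)
    (hp : ∀ p ∈ ps, -(N : Int) ≤ p.1 ∧ p.1 < (N : Int))
    (hq : ∀ p ∈ qs, -(N : Int) ≤ p.1 ∧ p.1 < (N : Int))
    (hsum : ∀ k : Int, pvKeySum ps k = pvKeySum qs k) :
    ps.foldl pvIncrBy (List.replicate N (0 : Int)) = qs.foldl pvIncrBy (List.replicate N (0 : Int)) := by
  obtain ⟨hpl, hpg⟩ := incrBy_foldl ps (List.replicate N 0) (by simpa using hp)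
  obtain ⟨hql, hqg⟩ := incrBy_foldl qs (List.replicate N 0) (by simpa using hq)
  apply List.ext_getElem
  · rw [hpl, hql]
  · intro i h1 h2
    have hiN : i < N := by
      rw [hpl, List.length_replicate] at h1
      exact h1
    rw [← PySem.List.getD_eq_getElem_of_lt _ _ 0 h1, ← PySem.List.getD_eq_getElem_of_lt _ _ 0 h2,
        hpg i (by rw [List.length_replicate]; exact hiN), hqg i (by rw [List.length_replicate]; exact hiN),
        hsum, hsum]

-- membership lemmas: values of either kind are in pvAll
lemma memC (dl : List (List (String × List Int))) (v : Int) (hv : v ∈ dl.flatMap pvC) : v ∈ pvAll dl := by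
  rw [List.mem_flatMap] at hv
  obtain ⟨it, hit, hvit⟩ := hv
  rw [pvAll, List.mem_flatMap]
  exact ⟨it, hit, List.mem_append_left _ hvit⟩

lemma memI (dl : List (List (String × List Int))) (v : Int) (hv : v ∈ dl.flatMap pvI) : v ∈ pvAll dl := by
  rw [List.mem_flatMap] at hv
  obtain ⟨it, hit, hvit⟩ := hv
  rw [pvAll, List.mem_flatMap]
  exact ⟨it, hit, List.mem_append_right _ hvit⟩

-- inside Pre_, every value is a valid (possibly negative) index into [0]*(maxdur+1)
lemma pvAll_bounds (dl : List (List (String × List Int)))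
    (hpre : ∀ v ∈ pvAll dl, -(pvMaxAll dl + 1) ≤ v) :
    ∀ v ∈ pvAll dl, -((((pvMaxAll dl + 1).toNat : Nat) : Int)) ≤ v ∧ v < (((pvMaxAll dl + 1).toNat : Nat) : Int) := by
  intro v hv
  have h1 := (PySem.List.le_foldl_max (pvAll dl) (-1)).2 v hv
  have h2 := hpre v hv
  have h0 := (PySem.List.le_foldl_max (pvAll dl) (-1)).1
  unfold pvMaxAll at *
  omega

-- the counter's item keys are values of the counted list
lemma counter_key_mem (vs : List Int) (p : Int × Int) (hp : p ∈ (PySem.Dict.counter vs).items) :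
    p.1 ∈ vs := by
  rw [PySem.Dict.items_counter, List.mem_map] at hp
  obtain ⟨a, ha, rfl⟩ := hp
  exact (PySem.Set.mem_ofList _ _).mp ha

-- ===== VERDICT (by name: the statement is the Claim_ definition above) =====
theorem collate_durations_spec : Claim_equal_collate_durations := by
  intro dl _ hpre
  rw [Spec_collate_durations, A_char, B_char]
  have hb := pvAll_bounds dl hpre.2
  unfold pvMaxAll at hb
  have hkey : ∀ (vs : List Int), (∀ v ∈ vs, v ∈ pvAll dl) →
      vs.foldl pvIncr (List.replicate ((pvAll dl).foldl max (-1) + 1).toNat (0 : Int))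
        = (PySem.Dict.counter vs).items.foldl pvIncrBy
            (List.replicate ((pvAll dl).foldl max (-1) + 1).toNat (0 : Int)) := by
    intro vs hsub
    rw [incr_as_incrBy]
    apply scatter_eq
    · intro p hp
      rw [List.mem_map] at hp
      obtain ⟨v, hv, rfl⟩ := hp
      exact hb v (hsub v hv)
    · intro p hp
      exact hb p.1 (hsub p.1 (counter_key_mem vs p hp))
    · intro k
      rw [keySum_units, keySum_counter]
  rw [hkey _ (memC dl), hkey _ (memI dl)]
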